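-- pv_equiv track=rewrite | github.com/joshanashakya/dissertation | workspace/dataset/java-python/GeeksForGeeks/3652/A/2.py | countTripletsLessThanL
-- ===== SOURCE A (Python) =====
-- def countTripletsLessThanL(n, L, arr):
--
--     # sort to get ordered triplets so that
--     # we can find the distance between
--     # farthest points belonging to a triplet
--     arr.sort()
--
--     ways = 0
--
--     # generate and check for all possible
--     # triplets: {arr[i], arr[j], arr[k]}
--     for i in range(n):
--         for j in range(i + 1, n):
--             for k in range(j + 1, n):
--
--                 # Since the array is sorted the
--                 # farthest points will be a[i]
--                 # and a[k];
--                 mostDistantDistance = arr[k] - arr[i]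
--                 if (mostDistantDistance <= L):
--                     ways += 1
--
--     return ways
-- ===== SOURCE B (Python) =====
-- def countTripletsLessThanL(n, L, arr):
--     # Sort; for each smallest element arr[i], binary-search the first index in
--     # [i+1, n] whose value exceeds arr[i] + L.  The m elements before it all fit,
--     # and any 2 of them complete a triplet with arr[i]: add C(m,2) = m*(m-1)//2.
--     arr.sort()
--     total = 0
--     for i in range(n):
--         lo, hi = i + 1, n
--         while lo < hi:
--             mid = (lo + hi) // 2
--             if arr[mid] - arr[i] <= L:
--                 lo = mid + 1
--             else:
--                 hi = mid
--         m = lo - i - 1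
--         total += m * (m - 1) // 2
--     return total
-- ===== Notes on version B (the rewrite author's own statement) =====
-- stated objective: faster
-- what changed: After the sort, the two inner loops over (j,k) are replaced, for each i, by a binary search for the last element within distance L and the closed form m*(m-1)//2 (any 2 of the m in-window elements complete a triplet).
-- outside the precondition, e.g. on countTripletsLessThanL(2, 0, []): A returns 0, B raises IndexError
import Mathlib
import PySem

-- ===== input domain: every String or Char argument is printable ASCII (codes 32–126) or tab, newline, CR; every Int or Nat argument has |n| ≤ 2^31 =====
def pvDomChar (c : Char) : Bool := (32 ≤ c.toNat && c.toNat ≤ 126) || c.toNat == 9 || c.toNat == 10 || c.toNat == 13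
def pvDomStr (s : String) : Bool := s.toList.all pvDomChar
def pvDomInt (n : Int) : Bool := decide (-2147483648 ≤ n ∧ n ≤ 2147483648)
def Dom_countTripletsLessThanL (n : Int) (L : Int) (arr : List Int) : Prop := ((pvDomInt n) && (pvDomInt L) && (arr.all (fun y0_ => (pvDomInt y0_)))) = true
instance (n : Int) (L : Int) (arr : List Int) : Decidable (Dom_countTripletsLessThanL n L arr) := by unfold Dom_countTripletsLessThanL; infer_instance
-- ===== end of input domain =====

-- B replaces A's two inner loops by a per-i binary search for the window end plus the closed form m*(m-1)//2 (measured faster).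
-- Both Pythons sort arr in place; the equivalence proved here is about the return value
-- (the in-place mutation is identical in A and B).

-- ===== PORT A =====
def countTripletsLessThanL (n : Int) (L : Int) (arr : List Int) : Int :=
  let a := PySem.List.sorted arr (fun x => x) false
  (PySem.List.pyRange 0 n 1).foldl (fun ways i =>
    (PySem.List.pyRange (i + 1) n 1).foldl (fun ways j =>
      (PySem.List.pyRange (j + 1) n 1).foldl (fun ways k =>
        if PySem.List.pyGetD a k 0 - PySem.List.pyGetD a i 0 ≤ L then ways + 1 else ways)
        ways) ways) 0

-- ===== PORT B =====
-- B's inner 'while lo < hi' binary search: structural recursion on a fuel that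
-- bounds the number of iterations (the gap hi - lo shrinks at every step)
def pvBisectGo (a : List Int) (L xi : Int) : Nat → Int → Int → Int
  | 0, lo, _ => lo
  | f + 1, lo, hi =>
    if lo < hi then
      let mid := PySem.Int.floordiv (lo + hi) 2
      if PySem.List.pyGetD a mid 0 - xi ≤ L then pvBisectGo a L xi f (mid + 1) hi
      else pvBisectGo a L xi f lo mid
    else lo

def pvBisect (a : List Int) (L xi : Int) (lo hi : Int) : Int :=
  pvBisectGo a L xi (hi - lo).toNat lo hi

def countTripletsLessThanL_alt (n : Int) (L : Int) (arr : List Int) : Int :=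
  let a := PySem.List.sorted arr (fun x => x) false
  (PySem.List.pyRange 0 n 1).foldl (fun total i =>
    let lo := pvBisect a L (PySem.List.pyGetD a i 0) (i + 1) n
    let m := lo - i - 1
    total + PySem.Int.floordiv (m * (m - 1)) 2) 0

-- ===== PRECONDITION & SPEC =====
-- Pre_ excludes n > len(arr): there A raises IndexError whenever the triple loop reaches an
-- out-of-range index (n ≥ 3), and only returns a vacuous 0 for the degenerate n ≤ 2; B's
-- per-i binary search raises IndexError on those degenerate inputs too.
def Pre_countTripletsLessThanL (n : Int) (L : Int) (arr : List Int) : Prop :=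
  n ≤ (arr.length : Int)
instance (n : Int) (L : Int) (arr : List Int) : Decidable (Pre_countTripletsLessThanL n L arr) := by
  unfold Pre_countTripletsLessThanL; infer_instance

def pvWitness_countTripletsLessThanL : Int × Int × List Int := (3, 2, [1, 5, 2])

def Spec_countTripletsLessThanL (n : Int) (L : Int) (arr : List Int) (out : Int) : Prop := out = countTripletsLessThanL_alt n L arr
instance (n : Int) (L : Int) (arr : List Int) (out : Int) : Decidable (Spec_countTripletsLessThanL n L arr out) := by unfold Spec_countTripletsLessThanL; infer_instance

-- ===== CLAIM (what is proved, stated in full; the proofs are below) =====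
def Claim_equal_countTripletsLessThanL : Prop := ∀ (n : Int) (L : Int) (arr : List Int), Dom_countTripletsLessThanL n L arr → Pre_countTripletsLessThanL n L arr → Spec_countTripletsLessThanL n L arr (countTripletsLessThanL n L arr)

-- ===== LEMMAS AND PROOFS =====

-- C(m,2) as B computes it
def pvC (m : Int) : Int := PySem.Int.floordiv (m * (m - 1)) 2

-- number of indices k in [t, b) with a[k] - a[i] <= L
def pvCnt (a : List Int) (L t b i : Int) : Int :=
  ((PySem.List.pyRange t b 1).countP
    (fun k => decide (PySem.List.pyGetD a k 0 - PySem.List.pyGetD a i 0 ≤ L)) : Nat)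

lemma pvC_zero : pvC 0 = 0 := by decide

lemma pvC_succ (m : Int) : pvC (m + 1) = m + pvC m := by
  obtain ⟨c, hc⟩ : Even ((m - 1) * (m - 1 + 1)) := Int.even_mul_succ_self (m - 1)
  have h1 : m * (m - 1) = 2 * c := by linear_combination hc
  have h2 : (m + 1) * (m + 1 - 1) = 2 * (c + m) := by linear_combination h1
  unfold pvC
  rw [h1, h2, PySem.Int.floordiv_eq_ediv_of_pos (by norm_num),
      PySem.Int.floordiv_eq_ediv_of_pos (by norm_num),
      Int.mul_ediv_cancel_left _ (by norm_num), Int.mul_ediv_cancel_left _ (by norm_num)]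
  ring

lemma pvCnt_nil (a : List Int) (L t b i : Int) (h : b ≤ t) : pvCnt a L t b i = 0 := by
  unfold pvCnt; rw [PySem.List.pyRange_one_eq_nil h]; rfl

lemma pvCnt_cons (a : List Int) (L t b i : Int) (h : t < b) :
    pvCnt a L t b i =
      (if PySem.List.pyGetD a t 0 - PySem.List.pyGetD a i 0 ≤ L then 1 else 0) +
        pvCnt a L (t + 1) b i := by
  unfold pvCnt
  rw [PySem.List.pyRange_one_cons h, List.countP_cons]
  by_cases hc : PySem.List.pyGetD a t 0 - PySem.List.pyGetD a i 0 ≤ L <;>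
    simp [hc, add_comm]

lemma pvCnt_zero_of_far (a : List Int) (L t b i : Int) (h0 : 0 ≤ t)
    (H : ∀ x y : Int, 0 ≤ x → x ≤ y → y < b → PySem.List.pyGetD a x 0 ≤ PySem.List.pyGetD a y 0)
    (hfar : ¬ PySem.List.pyGetD a t 0 - PySem.List.pyGetD a i 0 ≤ L) :
    pvCnt a L (t + 1) b i = 0 := by
  unfold pvCnt
  norm_cast
  rw [List.countP_eq_zero]
  intro k hk
  rw [PySem.List.mem_pyRange_one] at hk
  have hle := H t k h0 (by omega) hk.2
  simp only [decide_eq_true_eq]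
  omega

-- what the binary search returns: the boundary between near and far indices
lemma pvBisect_spec (a : List Int) (L n i : Int) (hi0 : 0 ≤ i)
    (H : ∀ x y : Int, 0 ≤ x → x ≤ y → y < n → PySem.List.pyGetD a x 0 ≤ PySem.List.pyGetD a y 0) :
    ∀ fuel : Nat, ∀ lo hi : Int, (hi - lo).toNat ≤ fuel → i < lo → lo ≤ hi → hi ≤ n →
    (∀ k : Int, i < k → k < lo → PySem.List.pyGetD a k 0 - PySem.List.pyGetD a i 0 ≤ L) →
    (∀ k : Int, hi ≤ k → k < n → ¬ PySem.List.pyGetD a k 0 - PySem.List.pyGetD a i 0 ≤ L) →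
    i < pvBisectGo a L (PySem.List.pyGetD a i 0) fuel lo hi ∧
      pvBisectGo a L (PySem.List.pyGetD a i 0) fuel lo hi ≤ n ∧
      (∀ k : Int, i < k → k < pvBisectGo a L (PySem.List.pyGetD a i 0) fuel lo hi →
        PySem.List.pyGetD a k 0 - PySem.List.pyGetD a i 0 ≤ L) ∧
      (∀ k : Int, pvBisectGo a L (PySem.List.pyGetD a i 0) fuel lo hi ≤ k → k < n →
        ¬ PySem.List.pyGetD a k 0 - PySem.List.pyGetD a i 0 ≤ L) := by
  intro fuel
  induction fuel with
  | zero =>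
    intro lo hi hf hil hlh hhn hlow hup
    have heq : hi = lo := by omega
    subst heq
    simp only [pvBisectGo]
    exact ⟨hil, by omega, hlow, fun k hk1 hk2 => hup k (by omega) hk2⟩
  | succ f ih =>
    intro lo hi hf hil hlh hhn hlow hup
    by_cases h : lo < hi
    · simp only [pvBisectGo]
      rw [if_pos h]
      have hb := PySem.Int.floordiv_two_mid_bounds (le_of_lt h)
      have hlt : PySem.Int.floordiv (lo + hi) 2 < hi :=
        (PySem.Int.floordiv_lt_iff_lt_mul (by norm_num)).mpr (by omega)
      set mid := PySem.Int.floordiv (lo + hi) 2 with hmid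
      by_cases hc : PySem.List.pyGetD a mid 0 - PySem.List.pyGetD a i 0 ≤ L
      · rw [if_pos hc]
        refine ih (mid + 1) hi (by omega) (by omega) (by omega) hhn ?_ hup
        intro k hk1 hk2
        rcases lt_or_ge k lo with hkl | hkl
        · exact hlow k hk1 hkl
        · have := H k mid (by omega) (by omega) (by omega)
          omega
      · rw [if_neg hc]
        refine ih lo mid (by omega) hil (by omega) (by omega) hlow ?_
        intro k hk1 hk2
        have := H mid k (by omega) hk1 hk2
        omega
    · simp only [pvBisectGo]
      rw [if_neg h]
      exact ⟨hil, by omega, hlow, fun k hk1 hk2 => hup k (by omega) hk2⟩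

-- a count whose predicate holds exactly on a prefix of the range is the prefix length
lemma pvCnt_of_split (a : List Int) (L t b i r : Int) (htr : t ≤ r) (hrb : r ≤ b)
    (hlow : ∀ k : Int, t ≤ k → k < r → PySem.List.pyGetD a k 0 - PySem.List.pyGetD a i 0 ≤ L)
    (hup : ∀ k : Int, r ≤ k → k < b → ¬ PySem.List.pyGetD a k 0 - PySem.List.pyGetD a i 0 ≤ L) :
    pvCnt a L t b i = r - t := by
  unfold pvCnt
  rw [PySem.List.pyRange_one_append t r b htr hrb, List.countP_append]
  have h1 : (PySem.List.pyRange t r 1).countP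
      (fun k => decide (PySem.List.pyGetD a k 0 - PySem.List.pyGetD a i 0 ≤ L))
      = (PySem.List.pyRange t r 1).length := by
    rw [List.countP_eq_length]
    intro k hk
    rw [PySem.List.mem_pyRange_one] at hk
    simpa using hlow k hk.1 hk.2
  have h2 : (PySem.List.pyRange r b 1).countP
      (fun k => decide (PySem.List.pyGetD a k 0 - PySem.List.pyGetD a i 0 ≤ L)) = 0 := by
    rw [List.countP_eq_zero]
    intro k hk
    rw [PySem.List.mem_pyRange_one] at hk
    simpa using hup k hk.1 hk.2
  rw [h1, h2, PySem.List.length_pyRange_one]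
  omega

-- the two inner loops of A, for a fixed i, as a sum of counts
lemma aInner (a : List Int) (L b i : Int) : ∀ fuel : Nat, ∀ t w : Int, (b - t).toNat = fuel →
    (PySem.List.pyRange t b 1).foldl (fun ways j =>
      (PySem.List.pyRange (j + 1) b 1).foldl (fun ways k =>
        if PySem.List.pyGetD a k 0 - PySem.List.pyGetD a i 0 ≤ L then ways + 1 else ways)
        ways) w
    = w + ((PySem.List.pyRange t b 1).map (fun j => pvCnt a L (j + 1) b i)).sum := by
  intro fuel
  induction fuel with
  | zero =>
    intro t w hf
    rw [PySem.List.pyRange_one_eq_nil (by omega)]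
    simp
  | succ f ih =>
    intro t w hf
    rcases le_or_gt b t with hbt | htb
    · rw [PySem.List.pyRange_one_eq_nil hbt]; simp
    · rw [PySem.List.pyRange_one_cons htb]
      simp only [List.foldl_cons, List.map_cons, List.sum_cons]
      rw [ih (t + 1) _ (by omega)]
      rw [PySem.List.foldl_ite_add_one]
      show w + ↑((PySem.List.pyRange (t+1) b 1).countP _) + _ = _
      unfold pvCnt
      ring

-- key combinatorial step: for sorted values, the sum of tail counts is C(count, 2)
lemma perI (a : List Int) (L b i : Int) (hi : 0 ≤ i)
    (H : ∀ x y : Int, 0 ≤ x → x ≤ y → y < b → PySem.List.pyGetD a x 0 ≤ PySem.List.pyGetD a y 0) :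
    ∀ fuel : Nat, ∀ t : Int, i < t → (b - t).toNat = fuel →
    ((PySem.List.pyRange t b 1).map (fun j => pvCnt a L (j + 1) b i)).sum
      = pvC (pvCnt a L t b i) := by
  intro fuel
  induction fuel with
  | zero =>
    intro t hit hf
    rw [PySem.List.pyRange_one_eq_nil (by omega), pvCnt_nil a L t b i (by omega)]
    simp [pvC_zero]
  | succ f ih =>
    intro t hit hf
    rcases le_or_gt b t with hbt | htb
    · rw [PySem.List.pyRange_one_eq_nil hbt, pvCnt_nil a L t b i hbt]
      simp [pvC_zero]
    · rw [PySem.List.pyRange_one_cons htb]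
      simp only [List.map_cons, List.sum_cons]
      rw [ih (t + 1) (by omega) (by omega)]
      rw [pvCnt_cons a L t b i htb]
      by_cases hc : PySem.List.pyGetD a t 0 - PySem.List.pyGetD a i 0 ≤ L
      · rw [if_pos hc, add_comm (1 : Int), pvC_succ _]
      · rw [if_neg hc, pvCnt_zero_of_far a L t b i (by omega) H hc]
        simp [pvC_zero]

-- the outer loops of A and B agree step by step
lemma outer (a : List Int) (L n : Int)
    (H : ∀ x y : Int, 0 ≤ x → x ≤ y → y < n → PySem.List.pyGetD a x 0 ≤ PySem.List.pyGetD a y 0) :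
    ∀ fuel : Nat, ∀ s w : Int, 0 ≤ s → (n - s).toNat = fuel →
    (PySem.List.pyRange s n 1).foldl (fun ways i =>
      (PySem.List.pyRange (i + 1) n 1).foldl (fun ways j =>
        (PySem.List.pyRange (j + 1) n 1).foldl (fun ways k =>
          if PySem.List.pyGetD a k 0 - PySem.List.pyGetD a i 0 ≤ L then ways + 1 else ways)
          ways) ways) w
    = (PySem.List.pyRange s n 1).foldl (fun total i =>
        let lo := pvBisect a L (PySem.List.pyGetD a i 0) (i + 1) n
        let m := lo - i - 1
        total + PySem.Int.floordiv (m * (m - 1)) 2) w := by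
  intro fuel
  induction fuel with
  | zero =>
    intro s w hs hf
    rw [PySem.List.pyRange_one_eq_nil (by omega)]
    rfl
  | succ f ih =>
    intro s w hs hf
    rcases le_or_gt n s with hns | hsn
    · rw [PySem.List.pyRange_one_eq_nil hns]; rfl
    · rw [PySem.List.pyRange_one_cons hsn]
      simp only [List.foldl_cons]
      rw [aInner a L n s (n - (s + 1)).toNat (s + 1) w rfl,
          perI a L n s hs H (n - (s + 1)).toNat (s + 1) (by omega) rfl]
      obtain ⟨hr1, hr2, hr3, hr4⟩ := pvBisect_spec a L n s hs H (n - (s + 1)).toNat (s + 1) n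
        le_rfl (by omega) (by omega) le_rfl (by intro k hk1 hk2; omega) (by intro k hk1 hk2; omega)
      have hcnt : pvCnt a L (s + 1) n s
          = pvBisectGo a L (PySem.List.pyGetD a s 0) (n - (s + 1)).toNat (s + 1) n - s - 1 := by
        rw [pvCnt_of_split a L (s + 1) n s
          (pvBisectGo a L (PySem.List.pyGetD a s 0) (n - (s + 1)).toNat (s + 1) n)
          (by omega) hr2 (fun k hk1 hk2 => hr3 k (by omega) hk2) hr4]
        ring
      rw [hcnt]
      exact ih (s + 1) _ (by omega) (by omega)

-- ===== VERDICT (by name: the statement is the Claim_ definition above) =====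
theorem countTripletsLessThanL_spec : Claim_equal_countTripletsLessThanL := by
  intro n L arr _ hpre
  unfold Spec_countTripletsLessThanL countTripletsLessThanL countTripletsLessThanL_alt
  simp only []
  have hlen : (PySem.List.sorted arr (fun x => x) false).length = arr.length :=
    PySem.List.length_sorted arr (fun x => x) false
  have H : ∀ x y : Int, 0 ≤ x → x ≤ y → y < n →
      PySem.List.pyGetD (PySem.List.sorted arr (fun x => x) false) x 0 ≤
      PySem.List.pyGetD (PySem.List.sorted arr (fun x => x) false) y 0 := by
    intro x y hx hxy hyn
    have hylen : y < ((PySem.List.sorted arr (fun x => x) false).length : Int) := by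
      rw [hlen]; exact lt_of_lt_of_le hyn hpre
    rw [PySem.List.pyGetD_eq_getElem _ _ hx (by omega),
        PySem.List.pyGetD_eq_getElem _ _ (by omega) hylen]
    exact PySem.List.sorted_id_getElem_mono arr (by omega) (by omega)
  rw [outer (PySem.List.sorted arr (fun x => x) false) L n H (n - 0).toNat 0 0 le_rfl rfl]
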